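-- pv_equiv track=rewrite | github.com/a676-code/flattened-sierpinski | flattened_sierpinski.py | generate_flattened_sierpinski
-- ===== SOURCE A (Python) =====
-- def decimalToBinary(n):
--     digits = []
--     while n >= 1:
--         digits.append(n % 2)
--         if n % 2 == 1:
--             n = int((n - 1) / 2)
--         elif n % 2 == 0:
--             n = int(n / 2)
--     return digits
--
-- def overlap(a, b):
--     a_digits = decimalToBinary(a)
--     b_digits = decimalToBinary(b)
--
--     if len(a_digits) < len(b_digits):
--         for i, d in enumerate(a_digits):
--             if d == 1 and b_digits[i] == 1:
--                 return True
--     return False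
--
-- def generate_flattened_sierpinski(n):
--     a = [0]
--     i = 2
--     while len(a) < n:
--         for x in reversed(range(i)):
--             if not overlap(x, i):
--                 a.append(x)
--         i += 1
--     return a
-- ===== SOURCE B (Python) =====
-- def generate_flattened_sierpinski(n):
--     # Output-sensitive block construction: instead of testing every x in range(i)
--     # with a digit-list overlap scan, emit the contiguous top run i-1..half
--     # (same bit length as i) whole, then enumerate the submasks of
--     # m = low ^ (i & low)  (i's zero-bits below the top bit) in decreasing
--     # order via the standard s = (s - 1) & m trick; only elements that
--     # actually belong to the block are ever visited.
--     a = [0]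
--     i = 2
--     while len(a) < n:
--         half = 1 << (i.bit_length() - 1)
--         a.extend(range(i - 1, half - 1, -1))
--         low = half - 1
--         m = low ^ (i & low)
--         s = m
--         while True:
--             a.append(s)
--             if s == 0:
--                 break
--             s = (s - 1) & m
--         i += 1
--     return a
-- ===== Notes on version B (the rewrite author's own statement) =====
-- stated objective: faster
-- what changed: Instead of testing every x in range(i) with a per-pair binary-digit overlap scan, B generates each block directly: it emits the contiguous run i-1..2^(L-1) and then enumerates the submasks of m = ~i & (2^(L-1)-1) in decreasing order with the s = (s-1) & m trick, so only elements that actually belong to the block are ever visited.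
import Mathlib
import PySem

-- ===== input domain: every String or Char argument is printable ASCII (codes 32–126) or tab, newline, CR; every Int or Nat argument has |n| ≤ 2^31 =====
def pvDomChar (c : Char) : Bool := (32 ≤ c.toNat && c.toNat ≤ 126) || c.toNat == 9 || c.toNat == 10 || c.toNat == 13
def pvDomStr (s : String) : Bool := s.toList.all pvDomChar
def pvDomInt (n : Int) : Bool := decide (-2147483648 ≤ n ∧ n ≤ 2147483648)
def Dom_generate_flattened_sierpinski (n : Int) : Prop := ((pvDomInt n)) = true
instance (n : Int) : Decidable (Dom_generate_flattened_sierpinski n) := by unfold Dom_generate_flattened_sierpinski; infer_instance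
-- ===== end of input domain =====

-- B builds each block directly (contiguous top run, then decreasing submask enumeration
-- s = (s-1) & m) instead of filtering every x < i with a digit-list overlap scan.

-- ===== PORT A =====

-- while n >= 1: digits.append(n % 2); n = int((n-1)/2) if odd else int(n/2)
-- (int(a/2) on these exact halves is truncating division: PySem.Int.truncdiv)
theorem decToBin_dec (n : Int) (h : 1 ≤ n) :
    (if PySem.Int.mod n 2 == 1 then PySem.Int.truncdiv (n - 1) 2
     else PySem.Int.truncdiv n 2).toNat < n.toNat := by
  simp only [PySem.Int.mod, PySem.Int.truncdiv, Int.tdiv_eq_ediv_of_nonneg (by omega : (0:Int) ≤ n - 1),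
    Int.tdiv_eq_ediv_of_nonneg (by omega : (0:Int) ≤ n)]
  split <;> omega

def decimalToBinary (n : Int) : List Int :=
  if h : 1 ≤ n then
    PySem.Int.mod n 2 ::
      decimalToBinary (if PySem.Int.mod n 2 == 1 then PySem.Int.truncdiv (n - 1) 2
                       else PySem.Int.truncdiv n 2)
  else []
termination_by n.toNat
decreasing_by exact decToBin_dec n h

-- the loop 'for i, d in enumerate(a_digits): if d == 1 and b_digits[i] == 1: return True';
-- b_digits[i] is always in range (the guard gives len a_digits < len b_digits), so the
-- enumerate-with-index loop is ported as simultaneous recursion on the two lists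
def overlapLoop : List Int → List Int → Bool
  | d :: ad, e :: bd => if d == 1 && e == 1 then true else overlapLoop ad bd
  | _, _ => false

theorem overlapLoop_nil_left (l : List Int) : overlapLoop [] l = false := by
  cases l <;> rfl

def overlap (a b : Int) : Bool :=
  let a_digits := decimalToBinary a
  let b_digits := decimalToBinary b
  if a_digits.length < b_digits.length then overlapLoop a_digits b_digits
  else false

-- 'for x in reversed(range(i)): if not overlap(x, i): a.append(x)'
def siBlockA (i : Int) : List Int :=
  (PySem.List.pyRange 0 i 1).reverse.filter (fun x => !overlap x i)

theorem zero_mem_siBlockA (i : Int) (hi : 2 ≤ i) : (0 : Int) ∈ siBlockA i := by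
  unfold siBlockA
  rw [List.mem_filter, List.mem_reverse, PySem.List.mem_pyRange_one]
  refine ⟨⟨le_refl _, by omega⟩, ?_⟩
  rw [overlap]
  have h0 : decimalToBinary 0 = [] := by rw [decimalToBinary]; simp
  simp only [h0]
  split <;> simp [overlapLoop_nil_left]

-- 'while len(a) < n: <block>; i += 1'  (i starts at 2 and only grows, carried as hypothesis
-- so that termination — each block appends at least x = 0 — is provable)
theorem siLoop_dec (n : Int) (a b : List Int) (hb : 0 < b.length)
    (h : (a.length : Int) < n) : (n - (a ++ b).length).toNat < (n - a.length).toNat := by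
  simp only [List.length_append]
  omega

def siLoopA (n : Int) (a : List Int) (i : Int) (hi : 2 ≤ i) : List Int :=
  if h : (a.length : Int) < n then
    siLoopA n (a ++ siBlockA i) (i + 1) (le_trans hi (le_add_of_nonneg_right zero_le_one))
  else a
termination_by (n - a.length).toNat
decreasing_by exact siLoop_dec n a _ (List.length_pos_of_mem (zero_mem_siBlockA i hi)) h

def generate_flattened_sierpinski (n : Int) : List Int :=
  siLoopA n [0] 2 (le_refl 2)

-- ===== PORT B =====

-- 'while True: a.append(s); if s == 0: break; s = (s - 1) & m'
-- (0 ≤ m and 0 ≤ s are invariants of B's loop, carried for termination)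
theorem sub_one_nonneg (s : Int) (hs : 0 ≤ s) (h : ¬ s = 0) : 0 ≤ s - 1 := by omega

theorem submask_dec (m s : Int) (hm : 0 ≤ m) (hs : 0 ≤ s) (h : ¬ s = 0) :
    (PySem.Int.band (s - 1) m).toNat < s.toNat := by
  rw [PySem.Int.band_of_nonneg (sub_one_nonneg s hs h) hm]
  have h1 : (s - 1).toNat &&& m.toNat ≤ (s - 1).toNat := Nat.and_le_left
  omega

def submaskLoopB (m s : Int) (hm : 0 ≤ m) (hs : 0 ≤ s) : List Int :=
  s :: (if h : s = 0 then [] else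
    submaskLoopB m (PySem.Int.band (s - 1) m) hm
      (PySem.Int.band_nonneg_of_nonneg_left m (sub_one_nonneg s hs h)))
termination_by s.toNat
decreasing_by exact submask_dec m s hm hs h

-- 'half = 1 << (i.bit_length() - 1)' : 1 <<< k is 2^k
theorem one_shiftl_int (k : Nat) : (1 : Int) <<< k = ((2 ^ k : Nat) : Int) := by
  simp [Int.shiftLeft_eq]

theorem half_sub_one_nonneg (k : Nat) : 0 ≤ ((1 : Int) <<< k) - 1 := by
  rw [one_shiftl_int]
  have : 1 ≤ 2 ^ k := Nat.one_le_two_pow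
  omega

theorem bxor_band_nonneg (i low : Int) (hi : 0 ≤ i) (hlow : 0 ≤ low) :
    0 ≤ PySem.Int.bxor low (PySem.Int.band i low) := by
  rw [PySem.Int.band_of_nonneg hi hlow,
    PySem.Int.bxor_of_nonneg hlow (Int.natCast_nonneg _)]
  exact Int.natCast_nonneg _

-- 'half = 1 << (i.bit_length()-1); a.extend(range(i-1, half-1, -1));
--  low = half - 1; m = low ^ (i & low); s = m; <submask loop>'
def siBlockB (i : Int) (hi : 2 ≤ i) : List Int :=
  let half : Int := (1 : Int) <<< (PySem.Int.bitLength i - 1)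
  let low : Int := half - 1
  let m : Int := PySem.Int.bxor low (PySem.Int.band i low)
  have hlow : 0 ≤ low := half_sub_one_nonneg _
  have hm : 0 ≤ m := bxor_band_nonneg i low (le_trans zero_le_two hi) hlow
  PySem.List.pyRange (i - 1) (half - 1) (-1) ++ submaskLoopB m m hm hm

theorem siBlockB_length_pos (i : Int) (hi : 2 ≤ i) : 0 < (siBlockB i hi).length := by
  rw [siBlockB]
  rw [submaskLoopB]
  simp

def siLoopB (n : Int) (a : List Int) (i : Int) (hi : 2 ≤ i) : List Int :=
  if h : (a.length : Int) < n then
    siLoopB n (a ++ siBlockB i hi) (i + 1) (le_trans hi (le_add_of_nonneg_right zero_le_one))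
  else a
termination_by (n - a.length).toNat
decreasing_by exact siLoop_dec n a _ (siBlockB_length_pos i hi) h

def generate_flattened_sierpinski_alt (n : Int) : List Int :=
  siLoopB n [0] 2 (le_refl 2)

-- ===== PRECONDITION & SPEC =====
def Spec_generate_flattened_sierpinski (n : Int) (out : List Int) : Prop := out = generate_flattened_sierpinski_alt n
instance (n : Int) (out : List Int) : Decidable (Spec_generate_flattened_sierpinski n out) := by unfold Spec_generate_flattened_sierpinski; infer_instance

-- ===== CLAIM (what is proved, stated in full; the proofs are below) =====
def Claim_equal_generate_flattened_sierpinski : Prop := ∀ (n : Int), Dom_generate_flattened_sierpinski n → Spec_generate_flattened_sierpinski n (generate_flattened_sierpinski n)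

-- ===== LEMMAS AND PROOFS =====

theorem overlapLoop_nil_right (l : List Int) : overlapLoop l [] = false := by
  cases l <;> rfl

-- for n ≥ 1 both of A's branches step to floor division by 2
theorem decimalToBinary_pos (n : Int) (h : 1 ≤ n) :
    decimalToBinary n = PySem.Int.mod n 2 :: decimalToBinary (PySem.Int.floordiv n 2) := by
  have hm : PySem.Int.mod n 2 = n % 2 := PySem.Int.mod_eq_emod_of_pos (by omega : (0:Int) < 2)
  have hf : PySem.Int.floordiv n 2 = n / 2 := by
    simp [PySem.Int.floordiv, Int.fdiv_eq_ediv]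
  have ht1 : PySem.Int.truncdiv (n - 1) 2 = (n - 1) / 2 := by
    simp [PySem.Int.truncdiv, Int.tdiv_eq_ediv_of_nonneg (by omega : (0:Int) ≤ n - 1)]
  have ht2 : PySem.Int.truncdiv n 2 = n / 2 := by
    simp [PySem.Int.truncdiv, Int.tdiv_eq_ediv_of_nonneg (by omega : (0:Int) ≤ n)]
  rw [decimalToBinary]
  rw [dif_pos h, hm, hf, ht1, ht2]
  congr 1
  by_cases hodd : n % 2 = 1
  · have : (n - 1) / 2 = n / 2 := by omega
    simp [hodd, this]
  · simp [hodd]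

theorem decimalToBinary_natCast (m : Nat) :
    decimalToBinary (m : Int) = ((m % 2 : Nat) : Int) :: decimalToBinary ((m / 2 : Nat) : Int) ∨
      (m = 0 ∧ decimalToBinary (m : Int) = []) := by
  rcases Nat.eq_zero_or_pos m with h | h
  · right; subst h; exact ⟨rfl, by rw [decimalToBinary]; simp⟩
  · left
    rw [decimalToBinary_pos _ (by exact_mod_cast h)]
    have h1 : PySem.Int.mod (m : Int) 2 = ((m % 2 : Nat) : Int) := by
      exact_mod_cast PySem.Int.mod_natCast m 2
    have h2 : PySem.Int.floordiv (m : Int) 2 = ((m / 2 : Nat) : Int) := by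
      exact_mod_cast PySem.Int.floordiv_natCast m 2
    rw [h1, h2]

theorem length_decimalToBinary (m : Nat) :
    (decimalToBinary (m : Int)).length = PySem.Int.bitLength (m : Int) := by
  induction m using Nat.strong_induction_on with
  | _ m ih =>
    rcases decimalToBinary_natCast m with h | ⟨h0, h⟩
    · have hm : 0 < m := by
        by_contra hm
        have : m = 0 := by omega
        subst this
        rw [decimalToBinary] at h; simp at h
      rw [h, List.length_cons, ih (m / 2) (by omega), PySem.Int.bitLength_natCast hm]
    · rw [h, h0]; simp [PySem.Int.bitLength_zero]

-- (a &&& b) % 2 = 1 exactly when both low bits are 1 (simp's bitwise lemmas close it)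
theorem and_mod_two_iff (a b : Nat) : ((a &&& b) % 2 = 1) ↔ (a % 2 = 1 ∧ b % 2 = 1) := by
  simp

-- A's inner scan over the common digit prefix computes exactly "a & b ≠ 0"
theorem overlapLoop_eq_land (a : Nat) : ∀ b : Nat,
    overlapLoop (decimalToBinary (a : Int)) (decimalToBinary (b : Int)) = decide (a &&& b ≠ 0) := by
  induction a using Nat.strong_induction_on with
  | _ a ih =>
    intro b
    rcases decimalToBinary_natCast a with ha | ⟨ha0, ha⟩
    · rcases decimalToBinary_natCast b with hb | ⟨hb0, hb⟩
      · rw [ha, hb, overlapLoop]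
        have ha' : 0 < a := by
          by_contra h
          have : a = 0 := by omega
          subst this; rw [decimalToBinary] at ha; simp at ha
        rw [ih (a / 2) (by omega) (b / 2)]
        have hrec : (a &&& b ≠ 0) ↔ ((a % 2 = 1 ∧ b % 2 = 1) ∨ a / 2 &&& b / 2 ≠ 0) := by
          rw [← and_mod_two_iff, ← Nat.and_div_two]
          omega
        by_cases h1 : a % 2 = 1 ∧ b % 2 = 1
        · have : ((((a % 2 : Nat) : Int)) == 1 && (((b % 2 : Nat) : Int)) == 1) = true := by
            simp [h1.1, h1.2]
          simp only [this, if_true]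
          simp [hrec, h1]
        · have : ((((a % 2 : Nat) : Int)) == 1 && (((b % 2 : Nat) : Int)) == 1) = false := by
            rcases Nat.mod_two_eq_zero_or_one a with h | h <;>
              rcases Nat.mod_two_eq_zero_or_one b with h' | h' <;>
                simp_all
          simp only [this]
          simp only [hrec]
          simp [h1]
      · rw [hb, hb0, overlapLoop_nil_right]
        simp
    · rw [ha, ha0, overlapLoop_nil_left]
      simp

-- the per-element tests agree: A's overlap is "bit_length smaller AND shared bit"
theorem overlap_eq (x i : Int) (hx : 0 ≤ x) (hi : 0 ≤ i) :
    (!overlap x i) = (decide (PySem.Int.bitLength i ≤ PySem.Int.bitLength x) ||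
      (PySem.Int.band x i == 0)) := by
  obtain ⟨xn, rfl⟩ := Int.eq_ofNat_of_zero_le hx
  obtain ⟨im, rfl⟩ := Int.eq_ofNat_of_zero_le hi
  rw [overlap]
  simp only [length_decimalToBinary, overlapLoop_eq_land]
  rw [PySem.Int.band_natCast]
  by_cases hlen : PySem.Int.bitLength (xn : Int) < PySem.Int.bitLength (im : Int)
  · rw [if_pos hlen]
    by_cases hz : xn &&& im = 0
    · simp [hz]
    · simp [hz, show ¬(PySem.Int.bitLength (im : Int) ≤ PySem.Int.bitLength (xn : Int)) by omega]
  · rw [if_neg hlen]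
    simp [show PySem.Int.bitLength (im : Int) ≤ PySem.Int.bitLength (xn : Int) by omega]

-- bit decomposition of &&& : low bit times tail
theorem and_decomp (a b : Nat) :
    a &&& b = 2 * (a / 2 &&& b / 2) + (if a % 2 = 1 ∧ b % 2 = 1 then 1 else 0) := by
  have h1 : (a &&& b) / 2 = a / 2 &&& b / 2 := Nat.and_div_two
  have h2 : ((a &&& b) % 2 = 1) ↔ (a % 2 = 1 ∧ b % 2 = 1) := and_mod_two_iff a b
  have h3 := Nat.mod_two_eq_zero_or_one (a &&& b)
  split_ifs with h <;> omega

theorem and_decomp_even (a b : Nat) (hb : b % 2 = 0) : a &&& b = 2 * (a / 2 &&& b / 2) := by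
  have h := and_decomp a b
  split_ifs at h with h' <;> omega

theorem and_decomp_odd (a b : Nat) (hb : b % 2 = 1) :
    a &&& b = 2 * (a / 2 &&& b / 2) + a % 2 := by
  have h := and_decomp a b
  have h3 := Nat.mod_two_eq_zero_or_one a
  split_ifs at h with h' <;> omega

-- (s-1) & m is the LARGEST submask of m below s: the correctness of B's enumeration step
theorem submask_pred (s : Nat) : ∀ m t : Nat, s &&& m = s → t &&& m = t → t < s →
    t ≤ (s - 1) &&& m := by
  induction s using Nat.strong_induction_on with
  | _ s ih =>
    intro m t hs ht hlt
    have hs0 : 0 < s := by omega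
    have hals : s / 2 &&& m / 2 ≤ s / 2 := Nat.and_le_left
    have halt : t / 2 &&& m / 2 ≤ t / 2 := Nat.and_le_left
    rcases Nat.mod_two_eq_zero_or_one m with hm | hm
    · -- m even ⇒ s, t even; recurse on halves
      have hds := and_decomp_even s m hm
      have hdt := and_decomp_even t m hm
      have hd1 := and_decomp_even (s - 1) m hm
      rw [hs] at hds
      rw [ht] at hdt
      have hs2 : s / 2 &&& m / 2 = s / 2 := by omega
      have ht2 : t / 2 &&& m / 2 = t / 2 := by omega
      have hih := ih (s / 2) (by omega) (m / 2) (t / 2) hs2 ht2 (by omega)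
      have he : (s - 1) / 2 = s / 2 - 1 := by omega
      rw [he] at hd1
      omega
    · have hds := and_decomp_odd s m hm
      have hdt := and_decomp_odd t m hm
      have hd1 := and_decomp_odd (s - 1) m hm
      rw [hs] at hds
      rw [ht] at hdt
      have hs2 : s / 2 &&& m / 2 = s / 2 := by omega
      have ht2 : t / 2 &&& m / 2 = t / 2 := by omega
      rcases Nat.mod_two_eq_zero_or_one s with hsE | hsO
      · -- m odd, s even: (s-1)&m = 2*((s/2-1)&(m/2)) + 1
        have hih := ih (s / 2) (by omega) (m / 2) (t / 2) hs2 ht2 (by omega)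
        have he : (s - 1) / 2 = s / 2 - 1 := by omega
        rw [he] at hd1
        omega
      · -- m odd, s odd: (s-1)&m = s-1
        have he : (s - 1) / 2 = s / 2 := by omega
        rw [he] at hd1
        omega

-- dropping a prefix of a descending range on which the filter is everywhere false
theorem filter_pyRange_desc_drop (p : Int → Bool) (a b : Int) (hb : -1 ≤ b) (hba : b ≤ a)
    (hno : ∀ t : Int, b < t → t ≤ a → p t = false) :
    (PySem.List.pyRange a (-1) (-1)).filter p = (PySem.List.pyRange b (-1) (-1)).filter p := by
  rcases eq_or_lt_of_le hba with h | h
  · rw [h]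
  · rw [PySem.List.pyRange_neg_one_cons (by omega : (-1:Int) < a), List.filter_cons,
      hno a (by omega) le_rfl]
    exact filter_pyRange_desc_drop p (a - 1) b hb (by omega)
      (fun t h1 h2 => hno t h1 (by omega))
termination_by (a - b).toNat
decreasing_by omega

-- proofs are irrelevant: the loop only depends on the values
theorem submaskLoopB_congr (m s s' : Int) (h : s = s') (hm : 0 ≤ m) (hs : 0 ≤ s)
    (hs' : 0 ≤ s') : submaskLoopB m s hm hs = submaskLoopB m s' hm hs' := by
  subst h; rfl

-- B's submask loop produces exactly the descending filtered list of submasks of m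
theorem submaskLoop_eq (mN : Nat) (sN : Nat) (hsub : sN &&& mN = sN)
    (hm : 0 ≤ (mN : Int)) (hs : 0 ≤ (sN : Int)) :
    submaskLoopB (mN : Int) (sN : Int) hm hs =
      (PySem.List.pyRange (sN : Int) (-1) (-1)).filter
        (fun x => PySem.Int.band x (mN : Int) == x) := by
  rw [submaskLoopB]
  rw [PySem.List.pyRange_neg_one_cons (by omega : (-1:Int) < (sN:Int)), List.filter_cons]
  have hps : ((fun x => PySem.Int.band x (mN : Int) == x) ((sN : Int))) = true := by
    show (PySem.Int.band (sN : Int) (mN : Int) == (sN : Int)) = true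
    rw [PySem.Int.band_natCast, hsub]
    exact beq_self_eq_true _
  simp only [hps, if_true]
  by_cases h0 : sN = 0
  · subst h0
    rw [dif_pos (by simp)]
    rw [PySem.List.pyRange_neg_one_eq_nil (by omega : ((0:Nat):Int) - 1 ≤ -1)]
    rfl
  · rw [dif_neg (show ¬((sN:Int) = 0) by exact_mod_cast h0)]
    have hc : ((sN : Int) - 1) = ((sN - 1 : Nat) : Int) := by omega
    have hband : PySem.Int.band ((sN : Int) - 1) (mN : Int) = (((sN - 1) &&& mN : Nat) : Int) := by
      rw [hc, PySem.Int.band_natCast]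
    rw [submaskLoopB_congr _ _ _ hband hm _ (Int.natCast_nonneg _)]
    have hsub' : ((sN - 1) &&& mN) &&& mN = (sN - 1) &&& mN := by
      rw [Nat.and_assoc, Nat.and_self]
    rw [submaskLoop_eq mN ((sN - 1) &&& mN) hsub' hm (Int.natCast_nonneg _)]
    congr 1
    refine (filter_pyRange_desc_drop _ ((sN : Int) - 1) (((sN - 1) &&& mN : Nat) : Int)
      (by omega) ?_ ?_).symm
    · have := Nat.and_le_left (n := sN - 1) (m := mN)
      omega
    · intro t h1 h2
      have ht0 : 0 ≤ t := le_trans (Int.natCast_nonneg _) (le_of_lt h1)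
      obtain ⟨tN, rfl⟩ := Int.eq_ofNat_of_zero_le ht0
      show (PySem.Int.band (tN : Int) (mN : Int) == (tN : Int)) = false
      rw [PySem.Int.band_natCast, beq_eq_false_iff_ne]
      intro hcon'
      have hcon : tN &&& mN = tN := by exact_mod_cast hcon'
      have := submask_pred sN mN tN hsub hcon (by omega)
      omega
termination_by sN
decreasing_by
  have := Nat.and_le_left (n := sN - 1) (m := mN)
  omega

theorem beq_cast_congr (a b c d : Nat) (h : (a = b) ↔ (c = d)) :
    ((a:Int) == (b:Int)) = ((c:Int) == (d:Int)) := by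
  rw [Bool.eq_iff_iff, beq_iff_eq, beq_iff_eq]
  constructor
  · intro hx; exact_mod_cast h.mp (by exact_mod_cast hx)
  · intro hx; exact_mod_cast h.mpr (by exact_mod_cast hx)

theorem bitLength_le_of_lt (x k : Nat) (h : x < 2 ^ k) : PySem.Int.bitLength (x : Int) ≤ k := by
  by_cases h0 : x = 0
  · subst h0; simp [PySem.Int.bitLength_zero]
  · by_contra hgt
    have h2 := PySem.Int.two_pow_bitLength_le (x : Int) (by exact_mod_cast h0)
    rw [Int.natAbs_natCast] at h2
    have : 2 ^ k ≤ 2 ^ (PySem.Int.bitLength (x : Int) - 1) :=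
      Nat.pow_le_pow_right (by omega) (by omega)
    omega

theorem le_bitLength_of_le (x k : Nat) (h : 2 ^ k ≤ x) : k + 1 ≤ PySem.Int.bitLength (x : Int) := by
  have h2 := PySem.Int.lt_two_pow_bitLength (x : Int)
  rw [Int.natAbs_natCast] at h2
  have : 2 ^ k < 2 ^ PySem.Int.bitLength (x : Int) := by omega
  have := (Nat.pow_lt_pow_iff_right (by omega : 1 < 2)).mp this
  omega

-- x has no bit in common with i  ⟺  x is a submask of m = low ^ (i & low)  (for x below the top bit)
theorem mask_iff (k iN xN : Nat) (hx : xN < 2 ^ k) :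
    (xN &&& iN = 0) ↔ (xN &&& ((2 ^ k - 1) ^^^ (iN &&& (2 ^ k - 1))) = xN) := by
  have hhigh : ∀ j, ¬ j < k → xN.testBit j = false := fun j hj =>
    Nat.testBit_lt_two_pow (lt_of_lt_of_le hx (Nat.pow_le_pow_right (by omega) (by omega)))
  constructor
  · intro hA
    apply Nat.eq_of_testBit_eq
    intro j
    have hbit : (xN.testBit j && iN.testBit j) = false := by
      have := congrArg (Nat.testBit · j) hA
      simpa [Nat.testBit_and] using this
    simp only [Nat.testBit_and, Nat.testBit_xor, Nat.testBit_two_pow_sub_one]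
    by_cases hxb : xN.testBit j = true
    · have hjk : j < k := by by_contra hjk; rw [hhigh j hjk] at hxb; simp at hxb
      have hib : iN.testBit j = false := by
        rw [hxb] at hbit; simpa using hbit
      simp [hxb, hib, hjk]
    · simp only [Bool.not_eq_true] at hxb
      simp [hxb]
  · intro hB
    apply Nat.eq_of_testBit_eq
    intro j
    rw [Nat.testBit_and, Nat.zero_testBit]
    by_cases hxb : xN.testBit j = true
    · have hjk : j < k := by by_contra hjk; rw [hhigh j hjk] at hxb; simp at hxb
      have := congrArg (Nat.testBit · j) hB
      simp only [Nat.testBit_and, Nat.testBit_xor, Nat.testBit_two_pow_sub_one, hxb, hjk] at this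
      simp only [decide_true, Bool.true_and, Bool.true_xor] at this
      simp [hxb]
      simpa using this
    · simp only [Bool.not_eq_true] at hxb
      simp [hxb]

theorem submaskLoopB_congr2 (m m' s s' : Int) (h1 : m = m') (h2 : s = s') (hm : 0 ≤ m)
    (hs : 0 ≤ s) (hm' : 0 ≤ m') (hs' : 0 ≤ s') :
    submaskLoopB m s hm hs = submaskLoopB m' s' hm' hs' := by
  subst h1; subst h2; rfl

-- the two blocks agree
theorem siBlock_eq (iN : Nat) (hiN : 2 ≤ iN) (hi : 2 ≤ (iN : Int)) :
    siBlockA (iN : Int) = siBlockB (iN : Int) hi := by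
  have hL1 : 1 ≤ PySem.Int.bitLength (iN : Int) := by
    have := PySem.Int.lt_two_pow_bitLength (iN : Int)
    rw [Int.natAbs_natCast] at this
    by_contra h
    have h0 : PySem.Int.bitLength (iN : Int) = 0 := by omega
    rw [h0] at this; norm_num at this; omega
  set L := PySem.Int.bitLength (iN : Int) with hLdef
  set k := L - 1 with hkdef
  set halfN := 2 ^ k with hhalfdef
  set c := halfN - 1 with hcdef
  set mN := c ^^^ (iN &&& c) with hmdef
  have hhalf1 : 1 ≤ halfN := Nat.one_le_two_pow
  have hlow : halfN ≤ iN := by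
    have := PySem.Int.two_pow_bitLength_le (iN : Int) (by exact_mod_cast (by omega : iN ≠ 0))
    rw [Int.natAbs_natCast] at this
    exact this
  have hhi : iN < 2 * halfN := by
    have := PySem.Int.lt_two_pow_bitLength (iN : Int)
    rw [Int.natAbs_natCast] at this
    have hLk : L = k + 1 := by omega
    have h2 : iN < 2 ^ L := this
    rw [hLk, pow_succ] at h2
    omega
  have hmle : mN ≤ c := by
    have h1 : c < 2 ^ k := by omega
    have h2 : iN &&& c ≤ c := Nat.and_le_right
    have := Nat.xor_lt_two_pow (x := c) (y := iN &&& c) (n := k) (by omega) (by omega)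
    omega
  -- rewrite B into explicit pieces
  have hBeq : siBlockB (iN : Int) hi =
      PySem.List.pyRange ((iN : Int) - 1) ((halfN : Int) - 1) (-1) ++
        submaskLoopB (mN : Int) (mN : Int) (Int.natCast_nonneg _) (Int.natCast_nonneg _) := by
    rw [siBlockB]
    simp only [one_shiftl_int]
    congr 1
    refine submaskLoopB_congr2 _ _ _ _ ?_ ?_ _ _ _ _ <;>
    · rw [show ((2 ^ (PySem.Int.bitLength (iN:Int) - 1) : Nat) : Int) - 1 = ((c : Nat) : Int) by
        simp only [hcdef, hhalfdef, hkdef, hLdef]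
        have : 1 ≤ 2 ^ (PySem.Int.bitLength (iN:Int) - 1) := Nat.one_le_two_pow
        push_cast [this]
        omega]
      rw [PySem.Int.band_natCast, PySem.Int.bxor_natCast]
  rw [hBeq]
  -- split A's descending scan at halfN
  rw [siBlockA,
    PySem.List.pyRange_one_append 0 (halfN : Int) (iN : Int) (by positivity) (by exact_mod_cast hlow),
    List.reverse_append, List.filter_append]
  congr 1
  · -- top run: every x with halfN ≤ x < iN passes A's test
    rw [show PySem.List.pyRange ((iN : Int) - 1) ((halfN : Int) - 1) (-1) =
        (PySem.List.pyRange (halfN : Int) (iN : Int) 1).reverse by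
      rw [PySem.List.pyRange_neg_one_eq_reverse,
        show ((halfN : Int) - 1) + 1 = (halfN : Int) by ring,
        show ((iN : Int) - 1) + 1 = (iN : Int) by ring]]
    apply List.filter_eq_self.mpr
    intro x hx
    rw [List.mem_reverse, PySem.List.mem_pyRange_one] at hx
    obtain ⟨xN, rfl⟩ := Int.eq_ofNat_of_zero_le (le_trans (by positivity) hx.1)
    rw [overlap_eq _ _ (Int.natCast_nonneg _) (Int.natCast_nonneg _)]
    have h2 : PySem.Int.bitLength (iN : Int) ≤ PySem.Int.bitLength (xN : Int) := by
      have := le_bitLength_of_le xN k (by exact_mod_cast hx.1)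
      have hLk : L = k + 1 := by omega
      show L ≤ _
      omega
    simp [h2]
  · -- low part: convert the test, then drop the all-false stretch, then the loop lemma
    rw [show (PySem.List.pyRange 0 (halfN : Int) 1).reverse =
        PySem.List.pyRange ((halfN : Int) - 1) (-1) (-1) by
      rw [PySem.List.pyRange_neg_one_eq_reverse,
        show ((-1 : Int)) + 1 = (0 : Int) by ring,
        show ((halfN : Int) - 1) + 1 = (halfN : Int) by ring]]
    rw [submaskLoop_eq mN mN (Nat.and_self mN) (Int.natCast_nonneg _) (Int.natCast_nonneg _)]
    have hconv : List.filter (fun x => !overlap x (iN : Int))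
        (PySem.List.pyRange ((halfN : Int) - 1) (-1) (-1)) =
        List.filter (fun x => PySem.Int.band x (mN : Int) == x)
        (PySem.List.pyRange ((halfN : Int) - 1) (-1) (-1)) := by
      refine List.filter_congr ?_
      intro x hx
      rw [PySem.List.mem_pyRange_neg_one] at hx
      obtain ⟨xN, rfl⟩ := Int.eq_ofNat_of_zero_le (by omega : (0:Int) ≤ x)
      have hxlt : xN < halfN := by omega
      rw [overlap_eq _ _ (Int.natCast_nonneg _) (Int.natCast_nonneg _)]
      have hbl : ¬ (PySem.Int.bitLength (iN : Int) ≤ PySem.Int.bitLength (xN : Int)) := by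
        rw [← hLdef]
        have := bitLength_le_of_lt xN k hxlt
        omega
      rw [decide_eq_false hbl, Bool.false_or]
      show (PySem.Int.band (xN : Int) (iN : Int) == (0 : Int)) =
        (PySem.Int.band (xN : Int) (mN : Int) == (xN : Int))
      rw [PySem.Int.band_natCast, PySem.Int.band_natCast,
        show (0 : Int) = ((0 : Nat) : Int) by norm_num]
      exact beq_cast_congr _ _ _ _ (mask_iff k iN xN hxlt)
    rw [hconv]
    refine filter_pyRange_desc_drop _ ((halfN : Int) - 1) (mN : Int) (by omega)
      (by omega) ?_
    intro t h1 h2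
    have ht0 : 0 ≤ t := le_trans (Int.natCast_nonneg _) (le_of_lt h1)
    obtain ⟨tN, rfl⟩ := Int.eq_ofNat_of_zero_le ht0
    show (PySem.Int.band (tN : Int) (mN : Int) == (tN : Int)) = false
    rw [PySem.Int.band_natCast, beq_eq_false_iff_ne]
    intro hcon'
    have hcon : tN &&& mN = tN := by exact_mod_cast hcon'
    have := Nat.and_le_right (n := tN) (m := mN)
    omega

-- the two outer loops agree step by step
theorem siLoop_eq (n : Int) (a : List Int) (i : Int) (hi : 2 ≤ i) :
    siLoopA n a i hi = siLoopB n a i hi := by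
  rw [siLoopA, siLoopB]
  split
  · obtain ⟨iN, rfl⟩ := Int.eq_ofNat_of_zero_le (by omega : (0:Int) ≤ i)
    rw [siBlock_eq iN (by exact_mod_cast hi) hi]
    exact siLoop_eq n (a ++ siBlockB _ hi) (_ + 1) (by omega)
  · rfl
termination_by (n - a.length).toNat
decreasing_by
  have := siBlockB_length_pos _ hi
  simp only [List.length_append]
  omega

-- ===== VERDICT (by name: the statement is the Claim_ definition above) =====
theorem generate_flattened_sierpinski_spec : Claim_equal_generate_flattened_sierpinski := by
  intro n _
  unfold Spec_generate_flattened_sierpinski generate_flattened_sierpinski generate_flattened_sierpinski_alt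
  exact siLoop_eq n [0] 2 (by omega)
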